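-- pv_equiv track=rewrite | github.com/firemanm/DL22_spring_basic | Homework1.py | cumsum_and_erase
-- ===== SOURCE A (Python) =====
-- def cumsum_and_erase(A, erase=1):
--     B = [0] * len(A)
--     for i in range(len(A)):
--        for j in range(i + 1):
--             B[i] = B[i] + A[j]
--     for i in range(len(B)-1, -1, -1):
--         if B[i] == erase:
--             B.pop(i)
--     return B
-- ===== SOURCE B (Python) =====
-- def cumsum_and_erase(A, erase=1):
--     out = []
--     total = 0
--     for a in A:
--         total += a
--         if total != erase:
--             out.append(total)
--     return out
-- ===== Notes on version B (the rewrite author's own statement) =====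
-- stated objective: faster
-- what changed: Replaces A's nested O(n^2) recomputation of each prefix sum plus a separate reverse pop pass with a single forward sweep maintaining one running total, appending it only when it differs from erase.
import Mathlib
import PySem

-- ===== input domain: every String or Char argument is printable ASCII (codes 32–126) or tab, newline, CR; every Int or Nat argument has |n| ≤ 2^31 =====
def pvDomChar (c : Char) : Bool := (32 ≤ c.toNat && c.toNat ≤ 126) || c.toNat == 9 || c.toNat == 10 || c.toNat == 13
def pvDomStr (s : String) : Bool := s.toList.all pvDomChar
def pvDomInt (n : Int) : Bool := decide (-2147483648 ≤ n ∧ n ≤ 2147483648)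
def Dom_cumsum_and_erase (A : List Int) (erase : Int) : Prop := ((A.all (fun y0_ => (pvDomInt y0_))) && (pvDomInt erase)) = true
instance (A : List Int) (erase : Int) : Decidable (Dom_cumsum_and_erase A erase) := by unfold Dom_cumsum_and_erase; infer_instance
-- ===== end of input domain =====

-- B replaces A's nested O(n^2) prefix-sum recomputation plus reverse-pop erase pass
-- with one forward sweep carrying a running total (objective: faster).

-- ===== PORT A =====
-- literal port: B = [0]*len(A); nested loops adding A[j] into B[i]; then the
-- downward pop loop (pop(i) = eraseIdx i; all indices are in range here).
def cumsum_and_erase (A : List Int) (erase : Int) : List Int :=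
  let B0 := List.replicate A.length (0 : Int)
  let B1 := (List.range A.length).foldl
    (fun B i => (List.range (i + 1)).foldl
      (fun B j => B.set i (B.getD i 0 + A.getD j 0)) B) B0
  (List.range B1.length).reverse.foldl
    (fun B i => if B.getD i 0 = erase then B.eraseIdx i else B) B1

-- ===== PORT B =====
def cumsum_and_erase_alt (A : List Int) (erase : Int) : List Int :=
  (A.foldl (fun (p : Int × List Int) a =>
      let t := p.1 + a
      (t, if t ≠ erase then p.2 ++ [t] else p.2)) (0, [])).2

-- ===== PRECONDITION & SPEC =====
def Spec_cumsum_and_erase (A : List Int) (erase : Int) (out : List Int) : Prop := out = cumsum_and_erase_alt A erase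
instance (A : List Int) (erase : Int) (out : List Int) : Decidable (Spec_cumsum_and_erase A erase out) := by unfold Spec_cumsum_and_erase; infer_instance

-- ===== CLAIM (what is proved, stated in full; the proofs are below) =====
def Claim_equal_cumsum_and_erase : Prop := ∀ (A : List Int) (erase : Int), Dom_cumsum_and_erase A erase → Spec_cumsum_and_erase A erase (cumsum_and_erase A erase)

-- ===== LEMMAS AND PROOFS =====

-- the inner j-loop just adds the sum of A-sampled values into slot i
theorem inner_fold_eq (A : List Int) (i m : Nat) (B : List Int) (hi : i < B.length) :
    (List.range m).foldl (fun B j => B.set i (B.getD i 0 + A.getD j 0)) B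
      = B.set i (B.getD i 0 + ((List.range m).map (fun j => A.getD j 0)).sum) := by
  induction m with
  | zero => simp [List.getD_eq_getElem?_getD, hi]
  | succ m ih =>
      rw [List.range_succ, List.foldl_append, ih]
      simp [List.getD_eq_getElem?_getD, hi]
      ring_nf

theorem range_map_getD (A : List Int) (m : Nat) (hm : m ≤ A.length) :
    (List.range m).map (fun j => A.getD j 0) = A.take m := by
  induction m with
  | zero => simp
  | succ m ih =>
      have hm' : m ≤ A.length := Nat.le_of_succ_le hm
      rw [List.range_succ, List.map_append, ih hm']
      have hA : A.getD m 0 = A[m] := by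
        rw [List.getD_eq_getElem?_getD, List.getElem?_eq_getElem (Nat.lt_of_succ_le hm)]
        rfl
      simp only [List.map_cons, List.map_nil]
      rw [hA, List.take_add_one, List.getElem?_eq_getElem (Nat.lt_of_succ_le hm)]
      rfl

-- the outer i-loop builds the prefix-sum list
theorem build_fold_eq (A : List Int) (k : Nat) (hk : k ≤ A.length) :
    (List.range k).foldl
      (fun B i => (List.range (i + 1)).foldl
        (fun B j => B.set i (B.getD i 0 + A.getD j 0)) B)
      (List.replicate A.length (0 : Int))
      = (List.range k).map (fun i => (A.take (i + 1)).sum)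
          ++ List.replicate (A.length - k) (0 : Int) := by
  induction k with
  | zero => simp
  | succ k ih =>
      have hk' : k ≤ A.length := Nat.le_of_succ_le hk
      rw [List.range_succ, List.foldl_append, ih hk']
      set P := (List.range k).map (fun i => (A.take (i + 1)).sum) with hP
      have hPlen : P.length = k := by simp [hP]
      have hrep : A.length - k = (A.length - (k + 1)) + 1 := by omega
      have hlen : k < (P ++ List.replicate (A.length - k) (0 : Int)).length := by
        simp [hPlen]; omega
      rw [List.foldl_cons, List.foldl_nil] at *
      rw [inner_fold_eq A k (k + 1) _ hlen, range_map_getD A (k + 1) hk]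
      have hget : (P ++ List.replicate (A.length - k) (0 : Int)).getD k 0 = 0 := by
        rw [hrep]
        simp [List.getD_eq_getElem?_getD, hPlen]
      rw [hget, zero_add, hrep]
      rw [List.replicate_succ, ← List.concat_append, List.concat_eq_append]
      rw [List.set_append_left k _ (by simp [hPlen])]
      have hset : (P ++ [(0:Int)]).set k (A.take (k + 1)).sum
          = P ++ [(A.take (k + 1)).sum] := by
        rw [List.set_append_right _ _ hPlen.le]
        simp [hPlen]
      rw [hset]
      simp [hP]

-- the downward pop loop is a filter on the processed prefix
theorem erase_fold_eq (erase : Int) (n : Nat) (B : List Int) (hn : n ≤ B.length) :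
    (List.range n).reverse.foldl
      (fun B i => if B.getD i 0 = erase then B.eraseIdx i else B) B
      = (B.take n).filter (fun x => decide (x ≠ erase)) ++ B.drop n := by
  induction n generalizing B with
  | zero => simp
  | succ n ih =>
      have hlt : n < B.length := Nat.lt_of_succ_le hn
      rw [List.range_succ, List.reverse_append, List.reverse_singleton]
      rw [List.singleton_append, List.foldl_cons]
      have hBn : B.getD n 0 = B[n] := by
        simp [List.getD_eq_getElem?_getD, List.getElem?_eq_getElem hlt]
      by_cases hc : B[n] = erase
      · rw [if_pos (by rw [hBn]; exact hc)]
        have hE : B.eraseIdx n = B.take n ++ B.drop (n + 1) :=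
          List.eraseIdx_eq_take_drop_succ B n
        have hlenE : n ≤ (B.eraseIdx n).length := by
          rw [hE]; simp; omega
        rw [ih _ hlenE, hE]
        have ht : (B.take n ++ B.drop (n + 1)).take n = B.take n := by
          rw [List.take_append_of_le_length (by simp [Nat.min_eq_left (le_of_lt hlt)])]
          simp [Nat.min_eq_left (le_of_lt hlt)]
        have hd : (B.take n ++ B.drop (n + 1)).drop n = B.drop (n + 1) := by
          rw [List.drop_append_of_le_length (by simp [Nat.min_eq_left (le_of_lt hlt)])]
          simp
        rw [ht, hd]
        have htk : B.take (n + 1) = B.take n ++ [B[n]] := by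
          rw [List.take_add_one, List.getElem?_eq_getElem hlt]; rfl
        rw [htk, List.filter_append]
        simp [hc]
      · rw [if_neg (by rw [hBn]; exact hc)]
        rw [ih _ (le_of_lt hlt)]
        have htk : B.take (n + 1) = B.take n ++ [B[n]] := by
          rw [List.take_add_one, List.getElem?_eq_getElem hlt]; rfl
        have hdr : B.drop n = B[n] :: B.drop (n + 1) :=
          (List.drop_eq_getElem_cons hlt)
        rw [htk, List.filter_append, hdr]
        simp [hc]

-- running prefix sums starting at t
def psum (t : Int) : List Int → List Int
  | [] => []
  | a :: as => (t + a) :: psum (t + a) as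

theorem alt_fold_eq (erase : Int) (A : List Int) (t : Int) (acc : List Int) :
    (A.foldl (fun (p : Int × List Int) a =>
        let u := p.1 + a
        (u, if u ≠ erase then p.2 ++ [u] else p.2)) (t, acc)).2
      = acc ++ (psum t A).filter (fun x => decide (x ≠ erase)) := by
  induction A generalizing t acc with
  | nil => simp [psum]
  | cons a as ih =>
      rw [List.foldl_cons]
      simp only []
      rw [ih]
      by_cases hc : t + a = erase
      · simp [psum, hc]
      · simp [psum, hc]

theorem psum_eq (A : List Int) (t : Int) :
    psum t A = (List.range A.length).map (fun i => t + (A.take (i + 1)).sum) := by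
  induction A generalizing t with
  | nil => simp [psum]
  | cons a as ih =>
      rw [psum, ih (t + a)]
      simp only [List.length_cons, List.range_succ_eq_map, List.map_cons, List.map_map]
      congr 1
      · simp
      · apply List.map_congr_left
        intro i _
        simp [Function.comp, List.take_succ_cons]
        ring

-- ===== VERDICT (by name: the statement is the Claim_ definition above) =====
theorem cumsum_and_erase_spec : Claim_equal_cumsum_and_erase := by
  intro A erase _
  unfold Spec_cumsum_and_erase cumsum_and_erase cumsum_and_erase_alt
  simp only []
  rw [build_fold_eq A A.length le_rfl]
  set P := (List.range A.length).map (fun i => (A.take (i + 1)).sum) with hP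
  have hPlen : P.length = A.length := by simp [hP]
  simp only [Nat.sub_self, List.replicate_zero, List.append_nil]
  rw [erase_fold_eq erase P.length P le_rfl, List.take_length, List.drop_length,
      List.append_nil]
  rw [alt_fold_eq erase A 0 [], List.nil_append, psum_eq A 0]
  simp [hP]
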